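-- pv_equiv track=rewrite | github.com/unibe-cns/NEAT | src/neat/simulations/nest/nestml_tools.py | get_functions_string
-- ===== SOURCE A (Python) =====
-- PERMITTED_BLOCK_NAMES = [
--     "parameters",
--     "state",
--     "equations",
--     "function",
--     "internals",
--     "input",
--     "output",
-- ]
--
-- def _get_index_of_block(contents, block_name):
--     found, kk = False, 0
--     while not found and kk < len(contents):
--         if block_name in contents[kk]:
--             found = True
--         else:
--             kk += 1
--
--     return kk
--
-- def get_functions_string(contents):
--     function_str = ""
--
--     try:
--         kk = 0
--         while kk < len(contents):
--             c0 = _get_index_of_block(contents[kk:], "function") + kk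
--             s0 = contents[c0].index("function")
--
--             c1 = min(
--                 [
--                     _get_index_of_block(contents[c0 + 1 :], block_name) + c0
--                     for block_name in PERMITTED_BLOCK_NAMES
--                 ]
--                 + [_get_index_of_block(contents[c0 + 1 :], "function") + c0]
--             )
--
--             function_str += (
--                 "\n    " + contents[c0][s0:] + "".join(contents[c0 + 1 : c1]) + "\n"
--             )
--
--             # move further, functions are assumed to at least occupy one line each
--             kk = c1 + 1
--
--     except (ValueError, IndexError) as e:
--         # we reached the end of the NESTML file and don't have anymore functions
--         # to check
--         pass
--
--     return function_str
-- ===== SOURCE B (Python) =====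
-- PERMITTED_BLOCK_NAMES = [
--     "parameters",
--     "state",
--     "equations",
--     "function",
--     "internals",
--     "input",
--     "output",
-- ]
--
--
-- def get_functions_string(contents):
--     # single forward pass with a small state machine:
--     # head = the "function ..." start of the block currently being collected (or None),
--     # buf  = the lines gathered after it; flushing drops buf's last line, exactly
--     # matching A's c1 = (next keyword line) - 1 convention, and the keyword line
--     # itself is re-examined as a possible new "function" start.
--     function_str = ""
--     head = None
--     buf = []
--     for line in contents:
--         if head is None:
--             if "function" in line:
--                 head = line[line.index("function"):]
--                 buf = []
--         elif any(name in line for name in PERMITTED_BLOCK_NAMES):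
--             function_str += "\n    " + head + "".join(buf[:-1]) + "\n"
--             if "function" in line:
--                 head = line[line.index("function"):]
--                 buf = []
--             else:
--                 head = None
--         else:
--             buf.append(line)
--     if head is not None:
--         function_str += "\n    " + head + "".join(buf[:-1]) + "\n"
--     return function_str
-- ===== Notes on version B (the rewrite author's own statement) =====
-- stated objective: faster
-- what changed: A repeatedly rescans the remaining list from scratch (a fresh _get_index_of_block pass over the whole suffix for each of 8 keywords, for every block found); B makes one forward pass over the lines with a tiny state machine (current block head + buffered lines), flushing a block when the next keyword line appears.
import Mathlib
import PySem

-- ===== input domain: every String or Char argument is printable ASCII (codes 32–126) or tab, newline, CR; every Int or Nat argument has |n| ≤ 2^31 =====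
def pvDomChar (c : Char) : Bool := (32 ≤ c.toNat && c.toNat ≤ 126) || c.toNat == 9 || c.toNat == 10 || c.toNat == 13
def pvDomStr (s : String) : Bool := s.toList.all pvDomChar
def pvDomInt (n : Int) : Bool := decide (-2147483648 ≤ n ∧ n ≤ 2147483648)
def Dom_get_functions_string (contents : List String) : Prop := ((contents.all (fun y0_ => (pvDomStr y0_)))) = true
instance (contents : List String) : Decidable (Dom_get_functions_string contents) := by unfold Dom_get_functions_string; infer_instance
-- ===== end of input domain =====

-- B replaces A's repeated forward re-scans (a fresh _get_index_of_block pass over the whole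
-- remaining list per keyword, per block) by ONE forward pass with a small state machine.

-- ===== PORT A =====
def pvPermittedBlockNames : List String :=
  ["parameters", "state", "equations", "function", "internals", "input", "output"]

-- while-loop of _get_index_of_block, as structural recursion over the scanned suffix
def pvGetIndexOfBlock : List String → String → Nat
  | [], _ => 0
  | c :: cs, block_name =>
      if PySem.Str.isIn block_name c then 0 else pvGetIndexOfBlock cs block_name + 1

-- the 'while kk < len(contents)' loop of A; fuel only makes the recursion structural
-- (kk strictly increases each iteration, so contents.length + 1 steps always suffice);
-- the 'none' branches are exactly the IndexError/ValueError exits the try/except catches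
def pvFunLoop (contents : List String) : Nat → Nat → String → String
  | 0, _, function_str => function_str
  | fuel + 1, kk, function_str =>
    if kk < contents.length then
      let c0 := pvGetIndexOfBlock (contents.drop kk) "function" + kk
      match PySem.List.pyGet? contents (c0 : Int) with
      | none => function_str  -- IndexError, caught
      | some line =>
        let s0 := PySem.Str.find line "function"
        if s0 < 0 then function_str  -- ValueError from .index, caught
        else
          match PySem.List.min?
              ((pvPermittedBlockNames.map
                  (fun block_name => pvGetIndexOfBlock (contents.drop (c0 + 1)) block_name + c0))
                ++ [pvGetIndexOfBlock (contents.drop (c0 + 1)) "function" + c0])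
              (fun x => x) with
          | none => function_str  -- ValueError from min([]), unreachable (list has 8 elements)
          | some c1 =>
            pvFunLoop contents fuel (c1 + 1)
              (function_str ++ ("\n    " ++ PySem.Str.slice line (some s0) none
                ++ PySem.Str.join ""
                    (PySem.List.slice contents (some ((c0 + 1 : Nat) : Int)) (some ((c1 : Nat) : Int)))
                ++ "\n"))
    else function_str

def get_functions_string (contents : List String) : String :=
  pvFunLoop contents (contents.length + 1) 0 ""

-- ===== PORT B =====
def pvIsKey (line : String) : Bool :=
  pvPermittedBlockNames.any (fun name => PySem.Str.isIn name line)

def pvHeadOf (line : String) : String :=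
  PySem.Str.slice line (some (PySem.Str.find line "function")) none

-- Source B's _flush
def pvFlushB (head : String) (buf : List String) : String :=
  "\n    " ++ head ++ PySem.Str.join "" (PySem.List.slice buf none (some (-1))) ++ "\n"

-- Source B's loop body
def pvStepB : String × Option String × List String → String → String × Option String × List String
  | (function_str, none, buf), line =>
      if PySem.Str.isIn "function" line then (function_str, some (pvHeadOf line), [])
      else (function_str, none, buf)
  | (function_str, some head, buf), line =>
      if pvIsKey line then
        if PySem.Str.isIn "function" line then
          (function_str ++ pvFlushB head buf, some (pvHeadOf line), [])
        else (function_str ++ pvFlushB head buf, none, [])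
      else (function_str, some head, buf ++ [line])

-- Source B's final 'if head is not None' flush
def pvFin : String × Option String × List String → String
  | (function_str, none, _) => function_str
  | (function_str, some head, buf) => function_str ++ pvFlushB head buf

def get_functions_string_alt (contents : List String) : String :=
  pvFin (contents.foldl pvStepB ("", none, []))

-- ===== PRECONDITION & SPEC =====
def Spec_get_functions_string (contents : List String) (out : String) : Prop := out = get_functions_string_alt contents
instance (contents : List String) (out : String) : Decidable (Spec_get_functions_string contents out) := by unfold Spec_get_functions_string; infer_instance

-- ===== CLAIM (what is proved, stated in full; the proofs are below) =====
def Claim_equal_get_functions_string : Prop := ∀ (contents : List String), Dom_get_functions_string contents → Spec_get_functions_string contents (get_functions_string contents)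

-- ===== LEMMAS AND PROOFS =====

-- first index whose line contains some permitted block name
def pvIdxKey : List String → Nat
  | [] => 0
  | c :: cs => if pvIsKey c then 0 else pvIdxKey cs + 1

-- the common block-decomposition shape of both programs' output
def pvAR (l : List String) : String :=
  match h : l[pvGetIndexOfBlock l "function"]? with
  | none => ""
  | some line =>
    "\n    " ++ pvHeadOf line
      ++ PySem.Str.join ""
          ((l.drop (pvGetIndexOfBlock l "function" + 1)).take
            (pvIdxKey (l.drop (pvGetIndexOfBlock l "function" + 1)) - 1))
      ++ "\n"
      ++ pvAR (l.drop (pvGetIndexOfBlock l "function"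
            + pvIdxKey (l.drop (pvGetIndexOfBlock l "function" + 1)) + 1))
termination_by l.length
decreasing_by
  have hi : pvGetIndexOfBlock l "function" < l.length := (List.getElem?_eq_some_iff.mp h).1
  simp only [List.length_drop]
  omega

lemma pvIdxKey_le (l : List String) : pvIdxKey l ≤ l.length := by
  induction l with
  | nil => simp [pvIdxKey]
  | cons c cs ih => simp only [pvIdxKey]; split <;> simp <;> omega

lemma pvAR_nil : pvAR [] = "" := by rw [pvAR]; rfl

lemma pvTake_dropLast {α : Type} (l : List α) (j : Nat) (h : j ≤ l.length) :
    (l.take j).dropLast = l.take (j - 1) := by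
  rw [List.dropLast_eq_take, List.take_take, List.length_take]
  congr 1
  omega

lemma pvIdx_get (l : List String) (b : String) (line : String)
    (h : l[pvGetIndexOfBlock l b]? = some line) : PySem.Str.isIn b line = true := by
  induction l with
  | nil => simp [pvGetIndexOfBlock] at h
  | cons c cs ih =>
    by_cases hc : PySem.Str.isIn b c
    · simp only [pvGetIndexOfBlock] at h; rw [if_pos hc] at h
      simp at h; subst h; exact hc
    · simp only [pvGetIndexOfBlock] at h; rw [if_neg hc] at h
      simp at h; exact ih h

lemma pvTake_no (l : List String) (b : String) :
    ∀ x ∈ l.take (pvGetIndexOfBlock l b), PySem.Str.isIn b x = false := by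
  induction l with
  | nil => simp
  | cons c cs ih =>
    by_cases hc : PySem.Str.isIn b c
    · simp only [pvGetIndexOfBlock]; rw [if_pos hc]; simp
    · simp only [pvGetIndexOfBlock]; rw [if_neg hc]
      simp only [List.take_succ_cons, List.mem_cons]
      rintro x (rfl | hx)
      · exact eq_false_of_ne_true hc
      · exact ih x hx

lemma pvMinlem (l : List String) :
    ∀ (k : Nat), PySem.List.min?
      ((pvPermittedBlockNames.map (fun block_name => pvGetIndexOfBlock l block_name + k))
        ++ [pvGetIndexOfBlock l "function" + k]) (fun x => x)
      = some (pvIdxKey l + k) := by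
  induction l with
  | nil =>
    intro k
    simp [pvPermittedBlockNames, pvGetIndexOfBlock, pvIdxKey, PySem.List.min?_id_cons]
  | cons c cs ih =>
    intro k
    by_cases h : pvIsKey c
    · simp only [pvIdxKey, if_pos h, Nat.zero_add]
      simp only [pvIsKey, pvPermittedBlockNames, List.any_cons, List.any_nil,
        Bool.or_eq_true, Bool.or_false] at h
      simp only [pvPermittedBlockNames, List.map_cons, List.map_nil, List.cons_append,
        List.nil_append, PySem.List.min?_id_cons, pvGetIndexOfBlock]
      congr 1
      rcases h with h|h|h|h|h|h|h <;> rw [if_pos h] <;> simp [List.foldl]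
    · have hid : pvIdxKey (c :: cs) = pvIdxKey cs + 1 := by simp [pvIdxKey, h]
      simp only [pvIsKey, pvPermittedBlockNames, List.any_cons, List.any_nil,
        Bool.or_eq_true, Bool.or_false, not_or, Bool.not_eq_true] at h
      obtain ⟨h1,h2,h3,h4,h5,h6,h7⟩ := h
      have e : ∀ b, PySem.Str.isIn b c = false → pvGetIndexOfBlock (c :: cs) b + k = pvGetIndexOfBlock cs b + (k+1) := by
        intro b hb; simp only [pvGetIndexOfBlock]; rw [if_neg (show ¬(PySem.Str.isIn b c = true) by rw [hb]; simp)]; omega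
      simp only [pvPermittedBlockNames, List.map_cons, List.map_nil, List.cons_append, List.nil_append]
      rw [e _ h1, e _ h2, e _ h3, e _ h4, e _ h5, e _ h6, e _ h7]
      have := ih (k+1)
      simp only [pvPermittedBlockNames, List.map_cons, List.map_nil, List.cons_append, List.nil_append] at this
      rw [this, hid]
      congr 1; omega

lemma pvB_skip (m : List String) :
    ∀ (p : String) (buf : List String), (∀ x ∈ m, PySem.Str.isIn "function" x = false) →
    m.foldl pvStepB (p, none, buf) = (p, none, buf) := by
  induction m with
  | nil => intro p buf _; rfl
  | cons c cs ih =>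
    intro p buf h
    have hc := h c (by simp)
    simp only [List.foldl_cons, pvStepB]
    rw [if_neg (show ¬(PySem.Str.isIn "function" c = true) by rw [hc]; simp)]
    exact ih p buf (fun x hx => h x (by simp [hx]))

lemma pvB_consume_key (m : List String) :
    ∀ (p hd : String) (buf : List String), pvIdxKey m < m.length →
      m.foldl pvStepB (p, some hd, buf)
        = (m.drop (pvIdxKey m)).foldl pvStepB
            (p ++ pvFlushB hd (buf ++ m.take (pvIdxKey m)), none, []) := by
  induction m with
  | nil => intro p hd buf h; simp [pvIdxKey] at h
  | cons c cs ih =>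
    intro p hd buf h
    by_cases hc : pvIsKey c
    · have h0 : pvIdxKey (c :: cs) = 0 := by simp [pvIdxKey, hc]
      rw [h0]
      simp only [List.drop_zero, List.take_zero, List.append_nil, List.foldl_cons, pvStepB]
      rw [if_pos hc]
    · have h1 : pvIdxKey (c :: cs) = pvIdxKey cs + 1 := by simp [pvIdxKey, hc]
      rw [h1]
      simp only [List.foldl_cons, pvStepB]
      rw [if_neg hc]
      rw [ih p hd (buf ++ [c]) (by rw [h1] at h; simp at h ⊢; omega)]
      simp only [List.drop_succ_cons, List.take_succ_cons]
      congr 2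
      simp

lemma pvB_consume_end (m : List String) :
    ∀ (p hd : String) (buf : List String), pvIdxKey m = m.length →
      m.foldl pvStepB (p, some hd, buf) = (p, some hd, buf ++ m) := by
  induction m with
  | nil => intro p hd buf _; simp
  | cons c cs ih =>
    intro p hd buf h
    have hc : ¬ (pvIsKey c = true) := by
      intro hk
      have : pvIdxKey (c :: cs) = 0 := by simp [pvIdxKey, hk]
      rw [this] at h; simp at h
    have h1 : pvIdxKey cs = cs.length := by
      have : pvIdxKey (c :: cs) = pvIdxKey cs + 1 := by simp [pvIdxKey, hc]
      rw [this] at h; simpa using h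
    simp only [List.foldl_cons, pvStepB]
    rw [if_neg hc, ih p hd (buf ++ [c]) h1]
    simp

lemma pvB_main (n : Nat) :
    ∀ (l : List String), l.length ≤ n → ∀ (p : String),
      pvFin (l.foldl pvStepB (p, none, [])) = p ++ pvAR l := by
  induction n with
  | zero =>
    intro l hl p
    have : l = [] := List.eq_nil_of_length_eq_zero (Nat.le_antisymm hl (Nat.zero_le _))
    subst this
    simp [pvFin, pvAR_nil]
  | succ n ih =>
    intro l hl p
    rcases hlt : l[pvGetIndexOfBlock l "function"]? with _ | line
    · have hge : l.length ≤ pvGetIndexOfBlock l "function" := by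
        simpa using List.getElem?_eq_none_iff.mp hlt
      have hskip : l.foldl pvStepB (p, none, []) = (p, none, []) := by
        apply pvB_skip l p []
        intro x hx
        exact pvTake_no l "function" x (by rw [List.take_of_length_le hge]; exact hx)
      rw [hskip]
      rw [pvAR]
      split
      · simp [pvFin]
      · rename_i line' h'
        rw [hlt] at h'; cases h'
    · have hi_lt : pvGetIndexOfBlock l "function" < l.length := (List.getElem?_eq_some_iff.mp hlt).1
      have hval : l[pvGetIndexOfBlock l "function"]'hi_lt = line := by
        have := List.getElem?_eq_some_iff.mp hlt
        exact this.2
      have hdrop : l.drop (pvGetIndexOfBlock l "function")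
          = line :: l.drop (pvGetIndexOfBlock l "function" + 1) := by
        rw [List.drop_eq_getElem_cons hi_lt, hval]
      have hfl : PySem.Str.isIn "function" line = true := pvIdx_get l "function" line hlt
      conv_lhs => rw [← List.take_append_drop (pvGetIndexOfBlock l "function") l]
      rw [List.foldl_append, pvB_skip (l.take (pvGetIndexOfBlock l "function")) p []
            (pvTake_no l "function"), hdrop, List.foldl_cons]
      simp only [pvStepB]
      rw [if_pos hfl]
      have hrest_len : (l.drop (pvGetIndexOfBlock l "function" + 1)).length < l.length := by
        simp only [List.length_drop]; omega
      rcases Nat.lt_or_ge (pvIdxKey (l.drop (pvGetIndexOfBlock l "function" + 1)))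
          (l.drop (pvGetIndexOfBlock l "function" + 1)).length with hlt2 | hge2
      · rw [pvB_consume_key _ p (pvHeadOf line) [] hlt2]
        rw [ih _ (by simp only [List.length_drop]; omega) _]
        conv_rhs => rw [pvAR]
        split
        · rename_i h'; rw [hlt] at h'; cases h'
        · rename_i line' h'
          rw [hlt] at h'
          cases h'
          rw [List.drop_drop]
          simp only [pvFlushB, List.nil_append, PySem.List.slice_to_neg_one]
          rw [pvTake_dropLast _ _ (Nat.le_of_lt hlt2)]
          have harg : pvGetIndexOfBlock l "function" + 1
                + pvIdxKey (l.drop (pvGetIndexOfBlock l "function" + 1))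
              = pvGetIndexOfBlock l "function"
                + pvIdxKey (l.drop (pvGetIndexOfBlock l "function" + 1)) + 1 := by omega
          rw [harg]
          simp [String.append_assoc]
      · have hje : pvIdxKey (l.drop (pvGetIndexOfBlock l "function" + 1))
            = (l.drop (pvGetIndexOfBlock l "function" + 1)).length :=
          Nat.le_antisymm (pvIdxKey_le _) hge2
        rw [pvB_consume_end _ p (pvHeadOf line) [] hje]
        simp only [pvFin, List.nil_append]
        rw [pvAR]
        split
        · rename_i h'; rw [hlt] at h'; cases h'
        · rename_i line' h'
          rw [hlt] at h'
          cases h'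
          have hnil : l.drop (pvGetIndexOfBlock l "function"
              + pvIdxKey (l.drop (pvGetIndexOfBlock l "function" + 1)) + 1) = [] := by
            rw [List.drop_eq_nil_iff]
            rw [hje]
            simp only [List.length_drop]
            omega
          rw [hnil, pvAR_nil]
          simp only [pvFlushB, PySem.List.slice_to_neg_one]
          rw [List.dropLast_eq_take, hje]
          simp [String.append_assoc]

lemma pvA_loop (contents : List String) : ∀ (fuel kk : Nat) (acc : String),
    contents.length < kk + fuel →
    pvFunLoop contents fuel kk acc = acc ++ pvAR (contents.drop kk) := by
  intro fuel
  induction fuel with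
  | zero =>
    intro kk acc h
    have hnil : contents.drop kk = [] := List.drop_eq_nil_iff.mpr (by omega)
    rw [hnil, pvAR_nil]
    simp [pvFunLoop]
  | succ fuel ih =>
    intro kk acc h
    by_cases hkk : kk < contents.length
    · simp only [pvFunLoop]
      rw [if_pos hkk]
      have hpg : PySem.List.pyGet? contents
          ((pvGetIndexOfBlock (contents.drop kk) "function" + kk : Nat) : Int)
          = contents[pvGetIndexOfBlock (contents.drop kk) "function" + kk]? :=
        PySem.List.pyGet?_natCast _ _
      have hgd : (contents.drop kk)[pvGetIndexOfBlock (contents.drop kk) "function"]?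
          = contents[pvGetIndexOfBlock (contents.drop kk) "function" + kk]? := by
        rw [List.getElem?_drop]
        congr 1
        omega
      rcases hcase : contents[pvGetIndexOfBlock (contents.drop kk) "function" + kk]? with _ | line
      · rw [hpg, hcase]
        conv_rhs => rw [pvAR]
        dsimp only
        split
        · simp
        · rename_i line' h'
          rw [hgd, hcase] at h'
          cases h'
      · rw [hpg, hcase]
        dsimp only
        have hsome : (contents.drop kk)[pvGetIndexOfBlock (contents.drop kk) "function"]?
            = some line := by rw [hgd, hcase]
        have hfl : PySem.Str.isIn "function" line = true :=
          pvIdx_get (contents.drop kk) "function" line hsome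
        have hnn : ¬ (PySem.Str.find line "function" < 0) := by
          rw [not_lt]
          exact (PySem.Str.find_nonneg_iff line "function").mpr
            ((PySem.Str.isIn_iff_infix "function" line).mp hfl)
        rw [if_neg hnn]
        rw [pvMinlem (contents.drop (pvGetIndexOfBlock (contents.drop kk) "function" + kk + 1))
              (pvGetIndexOfBlock (contents.drop kk) "function" + kk)]
        dsimp only
        rw [ih _ _ (by omega)]
        conv_rhs => rw [pvAR]
        split
        · rename_i h'
          rw [hgd, hcase] at h'
          cases h'
        · rename_i line' h'
          rw [hgd, hcase] at h'
          cases h'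
          set I := pvGetIndexOfBlock (contents.drop kk) "function" with hI
          rw [List.drop_drop, List.drop_drop]
          have ea : kk + (I + 1) = I + kk + 1 := by omega
          rw [ea]
          set J := pvIdxKey (contents.drop (I + kk + 1)) with hJ
          have eb : kk + (I + J + 1) = J + (I + kk) + 1 := by omega
          rw [eb]
          rw [PySem.List.slice_natCast]
          have e3 : J + (I + kk) - (I + kk + 1) = J - 1 := by omega
          rw [e3]
          simp [pvHeadOf, String.append_assoc]
    · simp only [pvFunLoop]
      rw [if_neg hkk]
      have hnil : contents.drop kk = [] := List.drop_eq_nil_iff.mpr (by omega)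
      rw [hnil, pvAR_nil]
      simp

-- ===== VERDICT (by name: the statement is the Claim_ definition above) =====
theorem get_functions_string_spec : Claim_equal_get_functions_string := by
  intro contents _
  unfold Spec_get_functions_string get_functions_string get_functions_string_alt
  rw [pvA_loop contents (contents.length + 1) 0 "" (by omega)]
  rw [pvB_main contents.length contents le_rfl ""]
  simp
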